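-- pv_equiv track=rewrite | github.com/ekansrm/ml-exp | nlp/app/utils.py | process_sample
-- ===== SOURCE A (Python) =====
-- def slice_sentence(x: str):
--     items = x.split("|")
--     dep = items[0::3]
--     op1 = items[1::3]
--     op2 = items[2::3]
--     # tokenizer
--     # embedding
--
--     return dep, op1, op2
--
-- def process_sample(batch):
--     """
--     [(sentence1, sentence2, y)]
--     :param batch:
--     :return:
--     """
--     dep_a = []
--     op1_a = []
--     op2_a = []
--     dep_b = []
--     op1_b = []
--     op2_b = []
--     y = []
--     for (sentence1, sentence2, _y) in batch:
--         _dep_a, _op1_a, _op2_a = slice_sentence(sentence1)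
--         _dep_b, _op1_b, _op2_b = slice_sentence(sentence2)
--
--         dep_a.append(_dep_a)
--         op1_a.append(_op1_a)
--         op2_a.append(_op2_a)
--
--         dep_b.append(_dep_b)
--         op1_b.append(_op1_b)
--         op2_b.append(_op2_b)
--         y.append(_y)
--
--     return dep_a, op1_a, op2_a, dep_b, op1_b, op2_b, y
-- ===== SOURCE B (Python) =====
-- def slice_sentence(x: str):
--     items = x.split("|")
--     return items[0::3], items[1::3], items[2::3]
--
-- def process_sample(batch):
--     if not batch:
--         return [], [], [], [], [], [], []
--     sentence1s, sentence2s, ys = zip(*batch)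
--     dep_a = [slice_sentence(s)[0] for s in sentence1s]
--     op1_a = [slice_sentence(s)[1] for s in sentence1s]
--     op2_a = [slice_sentence(s)[2] for s in sentence1s]
--     dep_b = [slice_sentence(s)[0] for s in sentence2s]
--     op1_b = [slice_sentence(s)[1] for s in sentence2s]
--     op2_b = [slice_sentence(s)[2] for s in sentence2s]
--     return dep_a, op1_a, op2_a, dep_b, op1_b, op2_b, list(ys)
-- ===== Notes on version B (the rewrite author's own statement) =====
-- stated objective: alternative
-- what changed: Replaces the single seven-accumulator append loop with a zip(*batch) transpose followed by per-column list comprehensions (one comprehension per output column), guarding the empty batch.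
import Mathlib
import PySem

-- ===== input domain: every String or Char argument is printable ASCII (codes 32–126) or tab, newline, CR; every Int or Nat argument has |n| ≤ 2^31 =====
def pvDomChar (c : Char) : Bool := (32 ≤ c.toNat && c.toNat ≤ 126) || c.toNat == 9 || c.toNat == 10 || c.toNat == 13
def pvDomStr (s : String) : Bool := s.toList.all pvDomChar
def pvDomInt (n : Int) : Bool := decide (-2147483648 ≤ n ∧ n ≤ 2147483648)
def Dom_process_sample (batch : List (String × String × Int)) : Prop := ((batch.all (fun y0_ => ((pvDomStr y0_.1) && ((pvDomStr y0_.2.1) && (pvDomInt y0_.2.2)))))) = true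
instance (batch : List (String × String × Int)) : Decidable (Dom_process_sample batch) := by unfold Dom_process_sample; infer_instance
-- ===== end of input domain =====

-- B replaces A's single seven-accumulator append loop by a transpose into column lists
-- followed by one list comprehension per output column (objective: alternative decomposition).


-- ===== PORT A =====
-- shared helper (identical in Source A and Source B): items = x.split("|"); items[0::3], items[1::3], items[2::3]
-- strided slice items[k::3] is PySem.List.slice?; step 3 ≠ 0, so the slice never raises and .getD [] is never hit
def slice_sentence (x : String) : List String × List String × List String :=
  -- "|" ≠ "", so split? never returns none and .getD [] is never hit
  let items := (PySem.Str.split? x "|").getD []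
  ((PySem.List.slice? items (some 0) none 3).getD [],
   (PySem.List.slice? items (some 1) none 3).getD [],
   (PySem.List.slice? items (some 2) none 3).getD [])

def pvStepA (acc : List (List String) × List (List String) × List (List String) × List (List String) × List (List String) × List (List String) × List Int)
    (t : String × String × Int) :
    List (List String) × List (List String) × List (List String) × List (List String) × List (List String) × List (List String) × List Int :=
  let a := slice_sentence t.1
  let b := slice_sentence t.2.1
  (acc.1 ++ [a.1], acc.2.1 ++ [a.2.1], acc.2.2.1 ++ [a.2.2],
   acc.2.2.2.1 ++ [b.1], acc.2.2.2.2.1 ++ [b.2.1], acc.2.2.2.2.2.1 ++ [b.2.2],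
   acc.2.2.2.2.2.2 ++ [t.2.2])

def process_sample (batch : List (String × String × Int)) : List (List String) × List (List String) × List (List String) × List (List String) × List (List String) × List (List String) × List Int :=
  batch.foldl pvStepA ([], [], [], [], [], [], [])

-- ===== PORT B =====
def process_sample_alt (batch : List (String × String × Int)) : List (List String) × List (List String) × List (List String) × List (List String) × List (List String) × List (List String) × List Int :=
  if batch = [] then ([], [], [], [], [], [], [])
  else
    let sentence1s := batch.map (fun t => t.1)
    let sentence2s := batch.map (fun t => t.2.1)
    let ys := batch.map (fun t => t.2.2)
    (sentence1s.map (fun s => (slice_sentence s).1),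
     sentence1s.map (fun s => (slice_sentence s).2.1),
     sentence1s.map (fun s => (slice_sentence s).2.2),
     sentence2s.map (fun s => (slice_sentence s).1),
     sentence2s.map (fun s => (slice_sentence s).2.1),
     sentence2s.map (fun s => (slice_sentence s).2.2),
     ys)

-- ===== PRECONDITION & SPEC =====
-- instance synthesis stalls on the 7-tuple's depth; assemble the DecidableEq term explicitly
def pvDecEq7 : DecidableEq (List (List String) × List (List String) × List (List String) × List (List String) × List (List String) × List (List String) × List Int) :=
  fun a b => @instDecidableEqProd _ _ inferInstance (@instDecidableEqProd _ _ inferInstance (@instDecidableEqProd _ _ inferInstance (@instDecidableEqProd _ _ inferInstance (@instDecidableEqProd _ _ inferInstance (@instDecidableEqProd _ _ inferInstance inferInstance))))) a b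

def Spec_process_sample (batch : List (String × String × Int)) (out : List (List String) × List (List String) × List (List String) × List (List String) × List (List String) × List (List String) × List Int) : Prop := out = process_sample_alt batch
instance (batch : List (String × String × Int)) (out : List (List String) × List (List String) × List (List String) × List (List String) × List (List String) × List (List String) × List Int) : Decidable (Spec_process_sample batch out) := by unfold Spec_process_sample; exact pvDecEq7 out (process_sample_alt batch)

-- ===== CLAIM (what is proved, stated in full; the proofs are below) =====
def Claim_equal_process_sample : Prop := ∀ (batch : List (String × String × Int)), Dom_process_sample batch → Spec_process_sample batch (process_sample batch)

-- ===== LEMMAS AND PROOFS =====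
lemma processA_loop (batch : List (String × String × Int))
    (d1 o1 o2 d2 p1 p2 : List (List String)) (y : List Int) :
    batch.foldl pvStepA (d1, o1, o2, d2, p1, p2, y) =
      (d1 ++ batch.map (fun t => (slice_sentence t.1).1),
       o1 ++ batch.map (fun t => (slice_sentence t.1).2.1),
       o2 ++ batch.map (fun t => (slice_sentence t.1).2.2),
       d2 ++ batch.map (fun t => (slice_sentence t.2.1).1),
       p1 ++ batch.map (fun t => (slice_sentence t.2.1).2.1),
       p2 ++ batch.map (fun t => (slice_sentence t.2.1).2.2),
       y ++ batch.map (fun t => t.2.2)) := by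
  induction batch generalizing d1 o1 o2 d2 p1 p2 y with
  | nil => simp
  | cons hd tl ih =>
    simp only [List.foldl_cons, List.map_cons]
    rw [ih]
    simp [pvStepA, List.append_assoc]

-- ===== VERDICT (by name: the statement is the Claim_ definition above) =====
theorem process_sample_spec : Claim_equal_process_sample := by
  intro batch _
  unfold Spec_process_sample process_sample process_sample_alt
  rw [processA_loop]
  rcases batch with _ | ⟨hd, tl⟩ <;> simp [List.map_map, Function.comp]
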